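-- pv_equiv track=rewrite | github.com/Dhenz14/Hive-AI | scripts/consolidate_skills.py | build_update
-- ===== SOURCE A (Python) =====
-- MAX_NEW_TOKENS = 500
--
-- def estimate_tokens(text: str) -> int:
--     """Rough token estimate: words * 4/3."""
--     return len(text.split()) * 4 // 3
--
-- def build_update(skill_name: str, success: list[str], failures: list[str]) -> str | None:
--     """Build the new content to append to SKILL.md. Returns None if nothing to add."""
--     sections = []
--
--     if success:
--         lines = ["", "### Consolidated Examples (auto-generated)", ""]
--         for i, block in enumerate(success, 1):
--             lines.append(f"**Example {i}** (from positive feedback):")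
--             lines.append("```")
--             lines.append(block)
--             lines.append("```")
--             lines.append("")
--         sections.append("\n".join(lines))
--
--     if failures:
--         lines = ["", "### Common Mistakes (auto-generated)", ""]
--         for pattern in failures:
--             lines.append(f"- {pattern}")
--         lines.append("")
--         sections.append("\n".join(lines))
--
--     if not sections:
--         return None
--
--     new_content = "\n".join(sections)
--     tokens = estimate_tokens(new_content)
--     if tokens > MAX_NEW_TOKENS:
--         # Truncate to fit budget — drop examples from the end
--         while estimate_tokens(new_content) > MAX_NEW_TOKENS and success:
--             success.pop()
--             return build_update(skill_name, success, failures)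
--         if estimate_tokens(new_content) > MAX_NEW_TOKENS:
--             return None
--
--     return new_content
-- ===== SOURCE B (Python) =====
-- MAX_NEW_TOKENS = 500
--
-- def estimate_tokens(text: str) -> int:
--     """Rough token estimate: words * 4/3."""
--     return len(text.split()) * 4 // 3
--
-- def build_update(skill_name, success, failures):
--     """Iterative prefix search: try the longest prefix of `success` that fits the
--     token budget, shrinking by one; never mutates its arguments (A pops from
--     `success` in place; equivalence claimed is about the return value only)."""
--     mistakes = ""
--     if failures:
--         mistakes = ("\n### Common Mistakes (auto-generated)\n\n"
--                     + "\n".join(f"- {p}" for p in failures) + "\n")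
--     for k in range(len(success), -1, -1):
--         parts = []
--         if k:
--             chunks = "\n\n".join(
--                 f"**Example {i}** (from positive feedback):\n```\n{b}\n```"
--                 for i, b in enumerate(success[:k], 1))
--             parts.append("\n### Consolidated Examples (auto-generated)\n\n"
--                          + chunks + "\n")
--         if mistakes:
--             parts.append(mistakes)
--         if not parts:
--             return None
--         content = "\n".join(parts)
--         if estimate_tokens(content) <= MAX_NEW_TOKENS:
--             return content
--     return None
-- ===== Notes on version B (the rewrite author's own statement) =====
-- stated objective: alternative
-- what changed: A recursively rebuilds the content while popping examples off `success` in place; B is a non-mutating iterative search that renders the failures section once and then tries each prefix length of `success` from longest to shortest, returning the first rendering that fits the token budget (string sections built by direct concatenation instead of line lists joined).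
import Mathlib
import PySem

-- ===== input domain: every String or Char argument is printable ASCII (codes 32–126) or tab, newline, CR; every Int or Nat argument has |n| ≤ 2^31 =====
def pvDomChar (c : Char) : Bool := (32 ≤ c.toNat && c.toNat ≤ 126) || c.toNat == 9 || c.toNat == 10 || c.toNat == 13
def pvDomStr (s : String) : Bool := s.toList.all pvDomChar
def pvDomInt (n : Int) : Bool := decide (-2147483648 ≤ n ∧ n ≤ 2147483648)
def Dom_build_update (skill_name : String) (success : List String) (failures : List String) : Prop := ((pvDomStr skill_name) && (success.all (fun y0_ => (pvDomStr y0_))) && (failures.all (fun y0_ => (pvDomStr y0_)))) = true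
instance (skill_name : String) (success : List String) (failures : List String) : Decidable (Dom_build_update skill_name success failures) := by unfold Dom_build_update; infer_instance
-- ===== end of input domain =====

-- B replaces A's recursive truncation (which pops from `success` in place and rebuilds everything
-- through the recursive call) by an iterative search for the longest prefix of `success` whose
-- rendering fits the token budget; A mutates `success` in place and B does not, so the equivalence
-- proved here is about the return value only.

-- ===== PORT A =====
-- estimate_tokens: len(text.split()) * 4 // 3  (helper defined identically in Source A and Source B)
def pvEstimateTokens (text : String) : Int :=
  PySem.Int.floordiv (PySem.List.len (PySem.Str.split₀ text) * 4) 3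

def build_update (skill_name : String) (success : List String) (failures : List String) : Option String :=
  let sections : List String := []
  let sections :=
    if success ≠ [] then
      let lines : List String := ["", "### Consolidated Examples (auto-generated)", ""]
      let lines := (PySem.List.enumerate success 1).foldl
        (fun ls p =>
          ls ++ ["**Example " ++ PySem.Int.toStr p.1 ++ "** (from positive feedback):",
                 "```", p.2, "```", ""]) lines
      sections ++ [PySem.Str.join "\n" lines]
    else sections
  let sections :=
    if failures ≠ [] then
      let lines : List String := ["", "### Common Mistakes (auto-generated)", ""]
      let lines := failures.foldl (fun ls pat => ls ++ ["- " ++ pat]) lines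
      let lines := lines ++ [""]
      sections ++ [PySem.Str.join "\n" lines]
    else sections
  if sections = [] then none
  else
    let new_content := PySem.Str.join "\n" sections
    let tokens := pvEstimateTokens new_content
    if tokens > 500 then
      -- the while-loop body runs at most once before `return`: pop + recurse; if `success` is
      -- already empty the loop is skipped and the re-checked guard returns None
      if hs : success ≠ [] then
        build_update skill_name success.dropLast failures
      else none
    else some new_content
termination_by success.length
decreasing_by
  have := List.length_pos_of_ne_nil hs
  simp only [List.length_dropLast]; omega

-- ===== PORT B =====
-- f"**Example {i}** (from positive feedback):\n```\n{b}\n```"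
def pvChunk (p : Int × String) : String :=
  "**Example " ++ PySem.Int.toStr p.1 ++ "** (from positive feedback):\n```\n" ++ p.2 ++ "\n```"

-- the `mistakes` string of Source B ("" when there are no failures)
def pvMistakes (failures : List String) : String :=
  if failures ≠ [] then
    "\n### Common Mistakes (auto-generated)\n\n" ++
      PySem.Str.join "\n" (failures.map (fun p => "- " ++ p)) ++ "\n"
  else ""

-- the `parts` list built in one iteration of Source B's loop (prefix of length k)
def pvParts (success : List String) (mistakes : String) (k : Nat) : List String :=
  (if k ≠ 0 then
     ["\n### Consolidated Examples (auto-generated)\n\n" ++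
        PySem.Str.join "\n\n" ((PySem.List.enumerate (success.take k) 1).map pvChunk) ++ "\n"]
   else []) ++
  (if mistakes ≠ "" then [mistakes] else [])

-- Source B's `for k in range(len(success), -1, -1)` loop, counting k down; falls off the end with None
def pvLoop (success : List String) (mistakes : String) : Nat → Option String
  | 0 =>
    let parts := pvParts success mistakes 0
    if parts = [] then none
    else if pvEstimateTokens (PySem.Str.join "\n" parts) ≤ 500 then
      some (PySem.Str.join "\n" parts)
    else none
  | k + 1 =>
    let parts := pvParts success mistakes (k + 1)
    if parts = [] then none
    else if pvEstimateTokens (PySem.Str.join "\n" parts) ≤ 500 then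
      some (PySem.Str.join "\n" parts)
    else pvLoop success mistakes k

def build_update_alt (skill_name : String) (success : List String) (failures : List String) : Option String :=
  pvLoop success (pvMistakes failures) success.length

-- ===== PRECONDITION & SPEC =====
def Spec_build_update (skill_name : String) (success : List String) (failures : List String) (out : Option String) : Prop := out = build_update_alt skill_name success failures
instance (skill_name : String) (success : List String) (failures : List String) (out : Option String) : Decidable (Spec_build_update skill_name success failures out) := by unfold Spec_build_update; infer_instance

-- ===== CLAIM (what is proved, stated in full; the proofs are below) =====
def Claim_equal_build_update : Prop := ∀ (skill_name : String) (success : List String) (failures : List String), Dom_build_update skill_name success failures → Spec_build_update skill_name success failures (build_update skill_name success failures)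

-- ===== LEMMAS AND PROOFS =====

-- join splits over an append of two non-empty part lists
lemma pv_join_append (sep : List Char) (l1 l2 : List (List Char)) (h1 : l1 ≠ []) (h2 : l2 ≠ []) :
    PySem.Chars.join sep (l1 ++ l2) = PySem.Chars.join sep l1 ++ sep ++ PySem.Chars.join sep l2 := by
  induction l1 with
  | nil => exact absurd rfl h1
  | cons a t ih =>
    cases t with
    | nil =>
      cases l2 with
      | nil => exact absurd rfl h2
      | cons b t2 => simp [PySem.Chars.join_cons_cons, PySem.Chars.join_singleton]
    | cons c t' =>
      have hih := ih (by simp)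
      rw [List.cons_append] at hih
      rw [show (a :: c :: t') ++ l2 = a :: (c :: (t' ++ l2)) from rfl,
        PySem.Chars.join_cons_cons, hih, PySem.Chars.join_cons_cons]
      simp [List.append_assoc]

lemma pv_join_singleton (x : String) : PySem.Str.join "\n" [x] = x := by
  apply String.ext
  simp [PySem.Str.toList_join, PySem.Chars.join_singleton]

-- char-level image of A's five lines for one example
def pvBlockA (p : Int × String) : List (List Char) :=
  ["**Example " ++ PySem.Int.toStr p.1 ++ "** (from positive feedback):",
   "```", p.2, "```", ""].map String.toList

-- B's rendering of one example (as built by pvChunk / pvSecS)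
def pvSecS (exs : List String) : String :=
  "\n### Consolidated Examples (auto-generated)\n\n" ++
    PySem.Str.join "\n\n" ((PySem.List.enumerate exs 1).map pvChunk) ++ "\n"

-- A's per-example five lines, joined with "\n", are B's "\n\n"-joined chunks plus a newline
lemma pv_flat_eq_chunks (ps : List (Int × String)) (h : ps ≠ []) :
    PySem.Chars.join ['\n'] (ps.flatMap pvBlockA)
      = PySem.Chars.join ['\n', '\n'] (ps.map (fun p => (pvChunk p).toList)) ++ ['\n'] := by
  induction ps with
  | nil => exact absurd rfl h
  | cons p t ih =>
    cases t with
    | nil =>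
      simp [pvBlockA, pvChunk, PySem.Chars.join_cons_cons, PySem.Chars.join_singleton]
    | cons q t' =>
      have hflat : (q :: t').flatMap pvBlockA ≠ [] := by simp [pvBlockA]
      rw [List.flatMap_cons,
        pv_join_append ['\n'] (pvBlockA p) ((q :: t').flatMap pvBlockA) (by simp [pvBlockA]) hflat,
        ih (by simp)]
      simp [pvBlockA, pvChunk, PySem.Chars.join_cons_cons, PySem.Chars.join_singleton]

-- A's success section equals B's success part
lemma pv_success_section (exs : List String) (h : exs ≠ []) :
    PySem.Str.join "\n"
        (["", "### Consolidated Examples (auto-generated)", ""] ++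
          (PySem.List.enumerate exs 1).flatMap
            (fun p => ["**Example " ++ PySem.Int.toStr p.1 ++ "** (from positive feedback):",
                       "```", p.2, "```", ""]))
      = pvSecS exs := by
  apply String.ext
  have hne : PySem.List.enumerate exs 1 ≠ [] := by
    cases exs with
    | nil => exact absurd rfl h
    | cons a t => simp [PySem.List.enumerate_cons]
  have hflatne : (PySem.List.enumerate exs 1).flatMap pvBlockA ≠ [] := by
    cases hE : PySem.List.enumerate exs 1 with
    | nil => exact absurd hE hne
    | cons a t => simp [pvBlockA]
  rw [PySem.Str.toList_join, List.map_append, List.map_flatMap]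
  rw [show ("\n" : String).toList = ['\n'] from rfl]
  have hfun : (fun p : Int × String =>
      List.map String.toList
        ["**Example " ++ PySem.Int.toStr p.1 ++ "** (from positive feedback):",
         "```", p.2, "```", ""]) = pvBlockA := rfl
  rw [hfun, pv_join_append _ _ _ (by simp) hflatne, pv_flat_eq_chunks _ hne]
  simp [pvSecS, PySem.Chars.join_cons_cons, PySem.Chars.join_singleton, PySem.Str.toList_join,
    List.map_map, Function.comp_def]

-- A's failures section equals B's `mistakes` string
lemma pv_failures_section (failures : List String) (h : failures ≠ []) :
    PySem.Str.join "\n"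
        (["", "### Common Mistakes (auto-generated)", ""] ++
          failures.map (fun pat => "- " ++ pat) ++ [""])
      = pvMistakes failures := by
  apply String.ext
  have hmne : List.map String.toList (failures.map (fun pat => "- " ++ pat)) ≠ [] := by
    simpa using h
  rw [PySem.Str.toList_join]
  simp only [pvMistakes, if_pos h, List.append_assoc]
  rw [List.map_append, List.map_append, pv_join_append _ _ _ (by simp) (by simpa using hmne),
    pv_join_append _ _ _ hmne (by simp)]
  simp [PySem.Chars.join_cons_cons, PySem.Chars.join_singleton, PySem.Str.toList_join,
    List.map_map, Function.comp_def]

lemma pv_mistakes_ne (failures : List String) (h : failures ≠ []) :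
    pvMistakes failures ≠ "" := by
  intro hc
  have := congrArg String.toList hc
  simp [pvMistakes, if_pos h] at this

-- closed form of one unfolding of A's body
lemma pv_A_step (sn : String) (success failures : List String) :
    build_update sn success failures =
      (let sections := (if success = [] then [] else [pvSecS success]) ++
                        (if failures = [] then [] else [pvMistakes failures])
       if sections = [] then none
       else if pvEstimateTokens (PySem.Str.join "\n" sections) > 500 then
         (if success = [] then none else build_update sn success.dropLast failures)
       else some (PySem.Str.join "\n" sections)) := by
  have hmap : List.flatMap (fun pat => ["- " ++ pat]) failures
      = failures.map (fun pat => "- " ++ pat) := Eq.symm List.map_eq_flatMap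
  by_cases hs : success = [] <;> by_cases hf : failures = []
  · rw [build_update]; simp [hs, hf]
  · rw [build_update]
    simp only [hs, ne_eq, not_true_eq_false, if_false, not_false_eq_true, if_pos hf,
      PySem.List.foldl_append_eq_flatMap, List.nil_append, hmap,
      pv_failures_section failures hf, if_neg hf]
    simp
  · rw [build_update]
    simp only [ne_eq, hf, not_true_eq_false, if_false, not_false_eq_true, if_pos hs,
      PySem.List.foldl_append_eq_flatMap, List.nil_append,
      pv_success_section success hs, if_neg hs]
    simp [hs]
  · rw [build_update]
    simp only [ne_eq, not_false_eq_true, if_pos hs, if_pos hf,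
      PySem.List.foldl_append_eq_flatMap, List.nil_append, hmap,
      pv_success_section success hs, pv_failures_section failures hf, if_neg hs, if_neg hf]
    simp [hs]

lemma pv_parts_eq (success : List String) (m : String) (k : Nat) :
    pvParts success m k =
      (if k = 0 then [] else [pvSecS (success.take k)]) ++ (if m = "" then [] else [m]) := by
  unfold pvParts pvSecS
  by_cases hk : k = 0 <;> by_cases hm : m = "" <;> simp [hk, hm]

-- pvLoop only looks at the first k elements of `success`
lemma pv_loop_take (m : String) (k : Nat) :
    ∀ s s' : List String, s.take k = s'.take k → pvLoop s m k = pvLoop s' m k := by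
  induction k with
  | zero => intro s s' _; simp [pvLoop, pvParts]
  | succ k ih =>
    intro s s' htake
    have hparts : pvParts s m (k + 1) = pvParts s' m (k + 1) := by
      simp [pvParts, htake]
    have htk : s.take k = s'.take k := by
      have h1 : (s.take (k + 1)).take k = (s'.take (k + 1)).take k := by rw [htake]
      have hmin : min k (k + 1) = k := by omega
      simpa [List.take_take, hmin] using h1
    simp only [pvLoop, hparts, ih s s' htk]

lemma pv_mistakes_if (failures : List String) :
    (if failures = [] then [] else [pvMistakes failures])
      = (if pvMistakes failures = "" then [] else [pvMistakes failures]) := by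
  by_cases hf : failures = []
  · subst hf; simp [pvMistakes]
  · simp [hf, pv_mistakes_ne failures hf]

-- the central bridge: A's recursion equals B's countdown loop
lemma pv_main (n : Nat) :
    ∀ (sn : String) (success failures : List String), success.length = n →
      build_update sn success failures = pvLoop success (pvMistakes failures) n := by
  induction n with
  | zero =>
    intro sn success failures hlen
    have hs : success = [] := List.eq_nil_of_length_eq_zero hlen
    subst hs
    rw [pv_A_step]
    by_cases hf : failures = []
    · subst hf; simp [pvLoop, pvParts, pvMistakes]
    · simp only [ne_eq, not_true_eq_false, if_false, if_neg hf, hf, not_false_eq_true, if_true,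
        List.nil_append, pvLoop, pv_parts_eq, pv_mistakes_ne failures hf,
        pv_join_singleton]
      split_ifs <;> first | rfl | omega
  | succ k ih =>
    intro sn success failures hlen
    have hs : success ≠ [] := by intro h; subst h; simp at hlen
    have htk1 : success.take (k + 1) = success := by
      rw [← hlen]; exact List.take_length
    have hparts : pvParts success (pvMistakes failures) (k + 1)
        = pvSecS success :: (if failures = [] then [] else [pvMistakes failures]) := by
      rw [pv_parts_eq, ← pv_mistakes_if]
      simp [htk1]
    have hrec : build_update sn success.dropLast failures
        = pvLoop success (pvMistakes failures) k := by
      have hdl : success.dropLast.length = k := by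
        simp [List.length_dropLast, hlen]
      rw [ih sn success.dropLast failures hdl]
      apply pv_loop_take
      simp [List.dropLast_eq_take, hlen, List.take_take]
    rw [pv_A_step]
    conv_rhs => rw [pvLoop]
    simp only [hparts, if_neg hs, List.singleton_append]
    rw [if_neg (List.cons_ne_nil _ _), if_neg (List.cons_ne_nil _ _)]
    split_ifs <;> first | rfl | omega | exact hrec

-- ===== VERDICT (by name: the statement is the Claim_ definition above) =====
theorem build_update_spec : Claim_equal_build_update := by
  intro skill_name success failures _
  unfold Spec_build_update build_update_alt
  exact pv_main success.length skill_name success failures rfl
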